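-- pv_equiv track=rewrite | github.com/Denisa872/CandyCrushProject | main.py | try_swap
-- ===== SOURCE A (Python) =====
-- def detect_matches(board):
--     matches = []
--     # Detectare orizontală
--     for i in range(len(board)):
--         for j in range(len(board[i]) - 2):
--             if board[i][j] == board[i][j + 1] == board[i][j + 2] != 0:
--                 matches.append((i, j, 'horiz'))  # h = orizontal
--     # Detectare verticală
--     for j in range(len(board[0])):
--         for i in range(len(board) - 2):
--             if board[i][j] == board[i + 1][j] == board[i + 2][j] != 0:
--                 matches.append((i, j, 'vert'))  # v = vertical
--     return matches
--
-- def try_swap(board):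
--     size = len(board)
--     for i in range(size):
--         for j in range(size - 1):
--             # Interschimbare pe orizontală
--             board[i][j], board[i][j + 1] = board[i][j + 1], board[i][j]
--             if detect_matches(board):
--                 return True
--             board[i][j], board[i][j + 1] = board[i][j + 1], board[i][j]  # Revenim la poziția inițială
--
--             # Interschimbare pe verticală
--             if i < size - 1:
--                 board[i][j], board[i + 1][j] = board[i + 1][j], board[i][j]
--                 if detect_matches(board):
--                     return True
--                 board[i][j], board[i + 1][j] = board[i + 1][j], board[i][j]  # Revenim la poziția inițială
--     return False
-- ===== SOURCE B (Python) =====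
-- def try_swap(board):
--     n = len(board)
--
--     # A board that already holds a triple: some swap leaves it intact, so the swap search succeeds.
--     for i in range(n):
--         for j in range(n - 2):
--             if board[i][j] == board[i][j + 1] == board[i][j + 2] != 0:
--                 return True
--             if board[j][i] == board[j + 1][i] == board[j + 2][i] != 0:
--                 return True
--
--     def run_h(get, r, s):
--         return 0 <= s and s + 2 < n and get(r, s) == get(r, s + 1) == get(r, s + 2) != 0
--
--     def run_v(get, s, c):
--         return 0 <= s and s + 2 < n and get(s, c) == get(s + 1, c) == get(s + 2, c) != 0
--
--     def run_through(get, r, c):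
--         return (run_h(get, r, c - 2) or run_h(get, r, c - 1) or run_h(get, r, c)
--                 or run_v(get, r - 2, c) or run_v(get, r - 1, c) or run_v(get, r, c))
--
--     # Only a run through one of the two swapped cells can be new; check that neighborhood only.
--     for i in range(n):
--         for j in range(n - 1):
--             def gh(r, c):
--                 if r == i and c == j:
--                     return board[i][j + 1]
--                 if r == i and c == j + 1:
--                     return board[i][j]
--                 return board[r][c]
--             if run_through(gh, i, j) or run_through(gh, i, j + 1):
--                 return True
--             if i < n - 1:
--                 def gv(r, c):
--                     if r == i and c == j:
--                         return board[i + 1][j]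
--                     if r == i + 1 and c == j:
--                         return board[i][j]
--                     return board[r][c]
--                 if run_through(gv, i, j) or run_through(gv, i + 1, j):
--                     return True
--     return False
-- ===== Notes on version B (the rewrite author's own statement) =====
-- stated objective: faster
-- what changed: Instead of performing every adjacent swap and rescanning the whole board for triples, B scans the board once for a pre-existing triple and then, for each swap, checks only the six 3-cell runs through each of the two swapped cells, without building swapped boards.
-- outside the precondition, e.g. on try_swap([[1, 2, 2, 2], [3, 4, 5, 6], [7, 8, 9, 1]]): A returns True, B returns False
import Mathlib
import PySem

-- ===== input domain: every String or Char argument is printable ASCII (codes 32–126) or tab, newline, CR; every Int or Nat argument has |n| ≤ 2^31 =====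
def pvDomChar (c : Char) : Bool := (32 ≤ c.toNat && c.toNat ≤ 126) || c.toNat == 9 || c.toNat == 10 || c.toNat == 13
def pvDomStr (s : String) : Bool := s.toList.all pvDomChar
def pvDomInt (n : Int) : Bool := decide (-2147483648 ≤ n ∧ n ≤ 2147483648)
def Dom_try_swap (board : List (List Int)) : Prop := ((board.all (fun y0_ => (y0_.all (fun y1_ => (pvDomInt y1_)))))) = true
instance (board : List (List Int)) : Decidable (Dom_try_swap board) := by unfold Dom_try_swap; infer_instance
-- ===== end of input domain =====

-- B answers "does some adjacent swap yield a 3-in-a-row" by one O(n^2) scan for an existing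
-- triple plus, per swap, a constant-size check of the runs through the two swapped cells,
-- instead of A's full-board rescan after each swap. Equivalence is about the RETURN value:
-- A mutates its argument in place (the board is left swapped when A returns True); B does not.

-- ===== PORT A =====
def detect_matches (board : List (List Int)) : List (Nat × Nat × String) :=
  ((List.range board.length).flatMap (fun i =>
    (List.range ((board.getD i []).length - 2)).filterMap (fun j =>
      if (board.getD i []).getD j 0 = (board.getD i []).getD (j+1) 0 ∧
         (board.getD i []).getD (j+1) 0 = (board.getD i []).getD (j+2) 0 ∧
         (board.getD i []).getD (j+2) 0 ≠ 0
      then some (i, j, "horiz") else none)))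
  ++ ((List.range (board.getD 0 []).length).flatMap (fun j =>
    (List.range (board.length - 2)).filterMap (fun i =>
      if (board.getD i []).getD j 0 = (board.getD (i+1) []).getD j 0 ∧
         (board.getD (i+1) []).getD j 0 = (board.getD (i+2) []).getD j 0 ∧
         (board.getD (i+2) []).getD j 0 ≠ 0
      then some (i, j, "vert") else none)))

-- board[i][j], board[i][j+1] = board[i][j+1], board[i][j]  (functional image of A's in-place swap+restore)
def hswapA (board : List (List Int)) (i j : Nat) : List (List Int) :=
  board.set i (((board.getD i []).set j ((board.getD i []).getD (j+1) 0)).set (j+1)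
    ((board.getD i []).getD j 0))

-- board[i][j], board[i+1][j] = board[i+1][j], board[i][j]
def vswapA (board : List (List Int)) (i j : Nat) : List (List Int) :=
  (board.set i ((board.getD i []).set j ((board.getD (i+1) []).getD j 0))).set (i+1)
    ((board.getD (i+1) []).set j ((board.getD i []).getD j 0))

def try_swap (board : List (List Int)) : Bool :=
  let size := board.length
  (List.range size).any (fun i =>
    (List.range (size - 1)).any (fun j =>
      if detect_matches (hswapA board i j) ≠ [] then true
      else if i < size - 1 then decide (detect_matches (vswapA board i j) ≠ []) else false))

-- ===== PORT B =====
-- run_h(get, r, s): a horizontal triple starting at column s (an int, possibly negative) in row r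
def runH (n : Nat) (get : Nat → Nat → Int) (r : Nat) (s : Int) : Bool :=
  decide (0 ≤ s ∧ s + 2 < (n : Int)) &&
    (let t := s.toNat  -- guarded by 0 ≤ s, where toNat is exact
     decide (get r t = get r (t+1) ∧ get r (t+1) = get r (t+2) ∧ get r (t+2) ≠ 0))

def runV (n : Nat) (get : Nat → Nat → Int) (s : Int) (c : Nat) : Bool :=
  decide (0 ≤ s ∧ s + 2 < (n : Int)) &&
    (let t := s.toNat
     decide (get t c = get (t+1) c ∧ get (t+1) c = get (t+2) c ∧ get (t+2) c ≠ 0))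

def runThrough (n : Nat) (get : Nat → Nat → Int) (r c : Nat) : Bool :=
  runH n get r ((c:Int) - 2) || runH n get r ((c:Int) - 1) || runH n get r (c:Int) ||
  runV n get ((r:Int) - 2) c || runV n get ((r:Int) - 1) c || runV n get (r:Int) c

-- gh: the board as seen after swapping (i,j) with (i,j+1), as a lookup function
def ghB (board : List (List Int)) (i j r c : Nat) : Int :=
  if r = i ∧ c = j then (board.getD i []).getD (j+1) 0
  else if r = i ∧ c = j + 1 then (board.getD i []).getD j 0
  else (board.getD r []).getD c 0

-- gv: the board as seen after swapping (i,j) with (i+1,j)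
def gvB (board : List (List Int)) (i j r c : Nat) : Int :=
  if r = i ∧ c = j then (board.getD (i+1) []).getD j 0
  else if r = i + 1 ∧ c = j then (board.getD i []).getD j 0
  else (board.getD r []).getD c 0

def try_swap_alt (board : List (List Int)) : Bool :=
  let n := board.length
  ((List.range n).any (fun i => (List.range (n - 2)).any (fun j =>
      decide ((board.getD i []).getD j 0 = (board.getD i []).getD (j+1) 0 ∧
              (board.getD i []).getD (j+1) 0 = (board.getD i []).getD (j+2) 0 ∧
              (board.getD i []).getD (j+2) 0 ≠ 0) ||
      decide ((board.getD j []).getD i 0 = (board.getD (j+1) []).getD i 0 ∧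
              (board.getD (j+1) []).getD i 0 = (board.getD (j+2) []).getD i 0 ∧
              (board.getD (j+2) []).getD i 0 ≠ 0))))
  ||
  ((List.range n).any (fun i => (List.range (n - 1)).any (fun j =>
      (runThrough n (ghB board i j) i j || runThrough n (ghB board i j) i (j+1)) ||
      (decide (i < n - 1) && (runThrough n (gvB board i j) i j || runThrough n (gvB board i j) (i+1) j)))))

-- ===== PRECONDITION & SPEC =====
-- Pre_ excludes non-square boards: A indexes every row up to the board's height and scans
-- columns by row 0's width, so short rows raise IndexError and overlong rows make A's answer
-- depend on cells outside the square grid the game uses; B assumes a square board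
-- (boards of height ≤ 1 are admitted with any row lengths: no swap exists, both return False).
def Pre_try_swap (board : List (List Int)) : Prop :=
  board.length ≤ 1 ∨ ∀ row ∈ board, row.length = board.length
instance (board : List (List Int)) : Decidable (Pre_try_swap board) := by unfold Pre_try_swap; infer_instance

def pvWitness_try_swap : List (List Int) := [[1, 2, 1], [2, 1, 2], [1, 2, 1]]

def Spec_try_swap (board : List (List Int)) (out : Bool) : Prop := out = try_swap_alt board
instance (board : List (List Int)) (out : Bool) : Decidable (Spec_try_swap board out) := by unfold Spec_try_swap; infer_instance

-- ===== CLAIM =====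
def Claim_equal_try_swap : Prop := ∀ (board : List (List Int)), Dom_try_swap board → Pre_try_swap board → Spec_try_swap board (try_swap board)

-- ===== LEMMAS AND PROOFS =====

-- cell value, and the squareness invariant used throughout
def cv (b : List (List Int)) (r c : Nat) : Int := (b.getD r []).getD c 0

def SqD (b : List (List Int)) : Prop := ∀ k, k < b.length → (b.getD k []).length = b.length

-- a horizontal / vertical triple in b
def HMat (b : List (List Int)) (i j : Nat) : Prop :=
  i < b.length ∧ j + 2 < b.length ∧
  cv b i j = cv b i (j+1) ∧ cv b i (j+1) = cv b i (j+2) ∧ cv b i (j+2) ≠ 0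

def VMat (b : List (List Int)) (i j : Nat) : Prop :=
  i + 2 < b.length ∧ j < b.length ∧
  cv b i j = cv b (i+1) j ∧ cv b (i+1) j = cv b (i+2) j ∧ cv b (i+2) j ≠ 0

def HasMat (b : List (List Int)) : Prop := ∃ i j, HMat b i j ∨ VMat b i j

-- a triple passing through cell (r,c), phrased on an abstract lookup function
def Thru (n : Nat) (g : Nat → Nat → Int) (r c : Nat) : Prop :=
  (∃ s, s ≤ c ∧ c ≤ s + 2 ∧ s + 2 < n ∧ g r s = g r (s+1) ∧ g r (s+1) = g r (s+2) ∧ g r (s+2) ≠ 0) ∨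
  (∃ s, s ≤ r ∧ r ≤ s + 2 ∧ s + 2 < n ∧ g s c = g (s+1) c ∧ g (s+1) c = g (s+2) c ∧ g (s+2) c ≠ 0)

-- getD/set toolbox
theorem getD_set_self {α : Type} (l : List α) (k : Nat) (a d : α) (h : k < l.length) :
    (l.set k a).getD k d = a := by
  simp [List.getD_eq_getElem?_getD, h]

theorem getD_set_ne {α : Type} (l : List α) (k m : Nat) (a d : α) (h : k ≠ m) :
    (l.set k a).getD m d = l.getD m d := by
  simp [List.getD_eq_getElem?_getD, h]

theorem set_getD_self {α : Type} (l : List α) (k : Nat) (d : α) (h : k < l.length) :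
    l.set k (l.getD k d) = l := by
  rw [List.getD_eq_getElem l d h]; exact List.set_getElem_self h

theorem len_hswapA (b : List (List Int)) (i j : Nat) : (hswapA b i j).length = b.length := by
  simp [hswapA]

theorem len_vswapA (b : List (List Int)) (i j : Nat) : (vswapA b i j).length = b.length := by
  simp [vswapA]

theorem sqd_hswapA (b : List (List Int)) (i j : Nat) (hsq : SqD b) : SqD (hswapA b i j) := by
  intro k hk
  rw [len_hswapA] at hk
  rw [len_hswapA]
  unfold hswapA
  by_cases hki : i = k
  · subst hki
    rw [getD_set_self _ _ _ _ hk]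
    simp only [List.length_set]
    exact hsq i hk
  · rw [getD_set_ne _ _ _ _ _ hki]; exact hsq k hk

theorem sqd_vswapA (b : List (List Int)) (i j : Nat) (hsq : SqD b) : SqD (vswapA b i j) := by
  intro k hk
  rw [len_vswapA] at hk
  rw [len_vswapA]
  unfold vswapA
  by_cases hk1 : i + 1 = k
  · subst hk1
    rw [getD_set_self _ _ _ _ (by simpa using hk)]
    simp only [List.length_set]
    exact hsq (i+1) hk
  · rw [getD_set_ne _ _ _ _ _ hk1]
    by_cases hki : i = k
    · subst hki
      rw [getD_set_self _ _ _ _ (by simpa using hk)]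
      simp only [List.length_set]
      exact hsq i (by omega)
    · rw [getD_set_ne _ _ _ _ _ hki]; exact hsq k hk

-- cells of a board / row after set, as explicit case splits
theorem cv_set1 (b : List (List Int)) (k : Nat) (nr : List Int) (r c : Nat)
    (hk : k < b.length) :
    cv (b.set k nr) r c = if r = k then nr.getD c 0 else cv b r c := by
  unfold cv
  by_cases h : r = k
  · subst h; rw [if_pos rfl, getD_set_self _ _ _ _ hk]
  · rw [if_neg h, getD_set_ne _ _ _ _ _ (fun e => h e.symm)]

theorem cv_set2 (b : List (List Int)) (k1 k2 : Nat) (r1 r2 : List Int) (r c : Nat)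
    (_hne : k1 ≠ k2) (h1 : k1 < b.length) (h2 : k2 < b.length) :
    cv ((b.set k1 r1).set k2 r2) r c =
      if r = k2 then r2.getD c 0 else if r = k1 then r1.getD c 0 else cv b r c := by
  rw [cv_set1 _ _ _ _ _ (by simpa using h2)]
  by_cases hr2 : r = k2
  · rw [if_pos hr2, if_pos hr2]
  · rw [if_neg hr2, if_neg hr2, cv_set1 _ _ _ _ _ h1]

theorem getD1_set1 (l : List Int) (k : Nat) (a : Int) (c : Nat) (h : k < l.length) :
    (l.set k a).getD c 0 = if c = k then a else l.getD c 0 := by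
  by_cases hc : c = k
  · subst hc; rw [if_pos rfl, getD_set_self _ _ _ _ h]
  · rw [if_neg hc, getD_set_ne _ _ _ _ _ (fun e => hc e.symm)]

theorem getD1_set2 (l : List Int) (k1 k2 : Nat) (a1 a2 : Int) (c : Nat)
    (_hne : k1 ≠ k2) (h1 : k1 < l.length) (h2 : k2 < l.length) :
    ((l.set k1 a1).set k2 a2).getD c 0 =
      if c = k2 then a2 else if c = k1 then a1 else l.getD c 0 := by
  by_cases hc2 : c = k2
  · subst hc2; rw [if_pos rfl, getD_set_self _ _ _ _ (by simpa using h2)]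
  · rw [if_neg hc2, getD_set_ne _ _ _ _ _ (fun e => hc2 e.symm)]
    by_cases hc1 : c = k1
    · subst hc1; rw [if_pos rfl, getD_set_self _ _ _ _ h1]
    · rw [if_neg hc1, getD_set_ne _ _ _ _ _ (fun e => hc1 e.symm)]

-- the B-side lookup functions compute exactly the cells of A's swapped boards
theorem gh_eq_cv (b : List (List Int)) (i j : Nat) (hsq : SqD b)
    (hi : i < b.length) (hj : j + 1 < b.length) (r c : Nat) :
    ghB b i j r c = cv (hswapA b i j) r c := by
  have hlen : (b.getD i []).length = b.length := hsq i hi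
  unfold ghB hswapA
  rw [cv_set1 b i _ r c hi,
      getD1_set2 (b.getD i []) j (j+1) ((b.getD i []).getD (j+1) 0) ((b.getD i []).getD j 0) c
        (by omega) (by omega) (by omega)]
  unfold cv
  split_ifs <;> first | rfl | (exfalso; omega) | (subst_vars; rfl)

theorem gv_eq_cv (b : List (List Int)) (i j : Nat) (hsq : SqD b)
    (hi : i + 1 < b.length) (hj : j < b.length) (r c : Nat) :
    gvB b i j r c = cv (vswapA b i j) r c := by
  have hlen1 : (b.getD i []).length = b.length := hsq i (by omega)
  have hlen2 : (b.getD (i+1) []).length = b.length := hsq (i+1) hi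
  unfold gvB vswapA
  rw [cv_set2 b i (i+1) ((b.getD i []).set j ((b.getD (i+1) []).getD j 0))
        ((b.getD (i+1) []).set j ((b.getD i []).getD j 0)) r c (by omega) (by omega) hi,
      getD1_set1 (b.getD (i+1) []) j ((b.getD i []).getD j 0) c (by omega),
      getD1_set1 (b.getD i []) j ((b.getD (i+1) []).getD j 0) c (by omega)]
  unfold cv
  split_ifs <;> first | rfl | (exfalso; omega) | (subst_vars; rfl)

-- swapping two equal cells is the identity
theorem hswap_id (b : List (List Int)) (i j : Nat) (hsq : SqD b)
    (hi : i < b.length) (hj : j + 1 < b.length)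
    (hv : cv b i j = cv b i (j+1)) : hswapA b i j = b := by
  unfold cv at hv
  unfold hswapA
  rw [← hv, set_getD_self _ _ _ (by rw [hsq i hi]; omega), hv,
      set_getD_self _ _ _ (by rw [hsq i hi]; omega), set_getD_self _ _ _ hi]

theorem vswap_id (b : List (List Int)) (i j : Nat) (hsq : SqD b)
    (hi : i + 1 < b.length) (hj : j < b.length)
    (hv : cv b i j = cv b (i+1) j) : vswapA b i j = b := by
  unfold cv at hv
  unfold vswapA
  rw [← hv, set_getD_self _ _ _ (by rw [hsq i (by omega)]; omega),
      set_getD_self _ _ _ (by omega), hv,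
      set_getD_self _ _ _ (by rw [hsq (i+1) hi]; omega), set_getD_self _ _ _ hi]

-- detect_matches is nonempty exactly when the board holds a triple
theorem ne_nil_iff_exists_mem {α : Type} (l : List α) : l ≠ [] ↔ ∃ x, x ∈ l := by
  constructor
  · exact List.exists_mem_of_ne_nil l
  · rintro ⟨x, hx⟩ rfl; simp at hx

theorem dm_iff (b : List (List Int)) (hsq : SqD b) :
    detect_matches b ≠ [] ↔ HasMat b := by
  rw [ne_nil_iff_exists_mem]
  constructor
  · rintro ⟨x, hx⟩
    unfold detect_matches at hx
    rcases List.mem_append.1 hx with hx | hx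
    · obtain ⟨i, hi, hx⟩ := List.mem_flatMap.1 hx
      obtain ⟨j, hj, hfj⟩ := List.mem_filterMap.1 hx
      rw [List.mem_range] at hi hj
      split at hfj
      · rename_i hcond
        exact ⟨i, j, Or.inl ⟨hi, by have := hsq i hi; omega, hcond.1, hcond.2.1, hcond.2.2⟩⟩
      · simp at hfj
    · obtain ⟨j, hj, hx⟩ := List.mem_flatMap.1 hx
      obtain ⟨i, hi, hfj⟩ := List.mem_filterMap.1 hx
      rw [List.mem_range] at hi hj
      split at hfj
      · rename_i hcond
        have hn : 0 < b.length := by omega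
        have := hsq 0 hn
        exact ⟨i, j, Or.inr ⟨by omega, by omega, hcond.1, hcond.2.1, hcond.2.2⟩⟩
      · simp at hfj
  · rintro ⟨i, j, hm | vm⟩
    · obtain ⟨hi, hj, e1, e2, e3⟩ := hm
      refine ⟨(i, j, "horiz"), List.mem_append.2 (Or.inl ?_)⟩
      refine List.mem_flatMap.2 ⟨i, List.mem_range.2 hi, ?_⟩
      refine List.mem_filterMap.2 ⟨j, List.mem_range.2 (by have := hsq i hi; omega), ?_⟩
      rw [if_pos ⟨e1, e2, e3⟩]
    · obtain ⟨hi, hj, e1, e2, e3⟩ := vm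
      refine ⟨(i, j, "vert"), List.mem_append.2 (Or.inr ?_)⟩
      refine List.mem_flatMap.2 ⟨j, List.mem_range.2 (by have := hsq 0 (by omega); omega), ?_⟩
      refine List.mem_filterMap.2 ⟨i, List.mem_range.2 (by omega), ?_⟩
      rw [if_pos ⟨e1, e2, e3⟩]

-- A's search succeeds iff some admissible swap leaves a triple on the board
theorem A_iff (b : List (List Int)) (hsq : SqD b) :
    try_swap b = true ↔ ∃ i j, i < b.length ∧ j + 1 < b.length ∧
      (HasMat (hswapA b i j) ∨ (i + 1 < b.length ∧ HasMat (vswapA b i j))) := by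
  unfold try_swap
  simp only [List.any_eq_true, List.mem_range]
  constructor
  · rintro ⟨i, hi, j, hj, hbody⟩
    refine ⟨i, j, hi, by omega, ?_⟩
    split at hbody
    · rename_i hdm
      exact Or.inl ((dm_iff _ (sqd_hswapA b i j hsq)).1 hdm)
    · split at hbody
      · rename_i hlt
        rw [decide_eq_true_eq] at hbody
        exact Or.inr ⟨by omega, (dm_iff _ (sqd_vswapA b i j hsq)).1 hbody⟩
      · simp at hbody
  · rintro ⟨i, j, hi, hj, hcase⟩
    refine ⟨i, hi, j, by omega, ?_⟩
    rcases hcase with hm | ⟨hi1, hm⟩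
    · rw [if_pos ((dm_iff _ (sqd_hswapA b i j hsq)).2 hm)]
    · split
      · rfl
      · rw [if_pos (by omega), decide_eq_true_eq]
        exact (dm_iff _ (sqd_vswapA b i j hsq)).2 hm

-- the local run check computes Thru
theorem rt_iff (n : Nat) (g : Nat → Nat → Int) (r c : Nat) :
    runThrough n g r c = true ↔ Thru n g r c := by
  unfold runThrough runH runV Thru
  simp only [Bool.or_eq_true, Bool.and_eq_true, decide_eq_true_eq]
  constructor
  · rintro (((((⟨⟨h1, h2⟩, hv⟩ | ⟨⟨h1, h2⟩, hv⟩) | ⟨⟨h1, h2⟩, hv⟩) | ⟨⟨h1, h2⟩, hv⟩) | ⟨⟨h1, h2⟩, hv⟩) | ⟨⟨h1, h2⟩, hv⟩)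
    · exact Or.inl ⟨((c : Int) - 2).toNat, by omega, by omega, by omega, hv⟩
    · exact Or.inl ⟨((c : Int) - 1).toNat, by omega, by omega, by omega, hv⟩
    · exact Or.inl ⟨((c : Int)).toNat, by omega, by omega, by omega, hv⟩
    · exact Or.inr ⟨((r : Int) - 2).toNat, by omega, by omega, by omega, hv⟩
    · exact Or.inr ⟨((r : Int) - 1).toNat, by omega, by omega, by omega, hv⟩
    · exact Or.inr ⟨((r : Int)).toNat, by omega, by omega, by omega, hv⟩
  · rintro (⟨s, hs1, hs2, hs3, hv⟩ | ⟨s, hs1, hs2, hs3, hv⟩)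
    · have hc : c = s ∨ c = s + 1 ∨ c = s + 2 := by omega
      rcases hc with h | h | h
      · refine Or.inl (Or.inl (Or.inl (Or.inr ⟨⟨by omega, by omega⟩, ?_⟩)))
        have ht : ((c : Int)).toNat = s := by omega
        rw [ht]; exact hv
      · refine Or.inl (Or.inl (Or.inl (Or.inl (Or.inr ⟨⟨by omega, by omega⟩, ?_⟩))))
        have ht : (((c : Nat) : Int) - 1).toNat = s := by omega
        rw [ht]; exact hv
      · refine Or.inl (Or.inl (Or.inl (Or.inl (Or.inl ⟨⟨by omega, by omega⟩, ?_⟩))))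
        have ht : (((c : Nat) : Int) - 2).toNat = s := by omega
        rw [ht]; exact hv
    · have hr : r = s ∨ r = s + 1 ∨ r = s + 2 := by omega
      rcases hr with h | h | h
      · refine Or.inr ⟨⟨by omega, by omega⟩, ?_⟩
        have ht : ((r : Int)).toNat = s := by omega
        rw [ht]; exact hv
      · refine Or.inl (Or.inr ⟨⟨by omega, by omega⟩, ?_⟩)
        have ht : (((r : Nat) : Int) - 1).toNat = s := by omega
        rw [ht]; exact hv
      · refine Or.inl (Or.inl (Or.inr ⟨⟨by omega, by omega⟩, ?_⟩))
        have ht : (((r : Nat) : Int) - 2).toNat = s := by omega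
        rw [ht]; exact hv

-- B's value, characterised
theorem B_iff (b : List (List Int)) (_hsq : SqD b) :
    try_swap_alt b = true ↔ HasMat b ∨ ∃ i j, i < b.length ∧ j + 1 < b.length ∧
      ((Thru b.length (ghB b i j) i j ∨ Thru b.length (ghB b i j) i (j+1)) ∨
       (i + 1 < b.length ∧ (Thru b.length (gvB b i j) i j ∨ Thru b.length (gvB b i j) (i+1) j))) := by
  unfold try_swap_alt
  simp only [List.any_eq_true, List.mem_range, Bool.or_eq_true, Bool.and_eq_true,
    decide_eq_true_eq, rt_iff]
  constructor
  · rintro (⟨i, hi, j, hj, hc | hc⟩ | ⟨i, hi, j, hj, hc⟩)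
    · exact Or.inl ⟨i, j, Or.inl ⟨hi, by omega, hc⟩⟩
    · exact Or.inl ⟨j, i, Or.inr ⟨by omega, hi, hc⟩⟩
    · refine Or.inr ⟨i, j, hi, by omega, ?_⟩
      rcases hc with h | ⟨h1, h2⟩
      · exact Or.inl h
      · exact Or.inr ⟨by omega, h2⟩
  · rintro (⟨i, j, ⟨hi, hj, hc⟩ | ⟨hi, hj, hc⟩⟩ | ⟨i, j, hi, hj, hc⟩)
    · exact Or.inl ⟨i, hi, j, by omega, Or.inl hc⟩
    · exact Or.inl ⟨j, hj, i, by omega, Or.inr hc⟩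
    · refine Or.inr ⟨i, hi, j, by omega, ?_⟩
      rcases hc with h | ⟨h1, h2⟩
      · exact Or.inl h
      · exact Or.inr ⟨by omega, h2⟩

-- P1: a triple already on the board survives some admissible swap
theorem P1 (b : List (List Int)) (hsq : SqD b) (h : HasMat b) :
    ∃ i j, i < b.length ∧ j + 1 < b.length ∧
      (HasMat (hswapA b i j) ∨ (i + 1 < b.length ∧ HasMat (vswapA b i j))) := by
  obtain ⟨i, j, hm | vm⟩ := h
  · obtain ⟨hi, hj, e⟩ := hm
    refine ⟨i, j, hi, by omega, Or.inl ?_⟩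
    rw [hswap_id b i j hsq hi (by omega) e.1]
    exact ⟨i, j, Or.inl ⟨hi, hj, e⟩⟩
  · obtain ⟨hi, hj, e⟩ := vm
    by_cases hj1 : j + 1 < b.length
    · refine ⟨i, j, by omega, hj1, Or.inr ⟨by omega, ?_⟩⟩
      rw [vswap_id b i j hsq (by omega) hj e.1]
      exact ⟨i, j, Or.inr ⟨hi, hj, e⟩⟩
    · -- j is the last column: swap (0,0)-(1,0) is disjoint from the triple
      have hj0 : 2 ≤ j := by omega
      refine ⟨0, 0, by omega, by omega, Or.inr ⟨by omega, ?_⟩⟩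
      have hcv : ∀ r, cv (vswapA b 0 0) r j = cv b r j := by
        intro r
        rw [← gv_eq_cv b 0 0 hsq (by omega) (by omega) r j]
        unfold gvB
        rw [if_neg (by omega), if_neg (by omega)]
        rfl
      refine ⟨i, j, Or.inr ⟨by rw [len_vswapA]; omega, by rw [len_vswapA]; omega, ?_, ?_, ?_⟩⟩
      · rw [hcv i, hcv (i+1)]; exact e.1
      · rw [hcv (i+1), hcv (i+2)]; exact e.2.1
      · rw [hcv (i+2)]; exact e.2.2

-- P2: a run through a cell of the swapped board is a triple of the swapped board
theorem P2h (b : List (List Int)) (i j r c : Nat) (hsq : SqD b)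
    (hi : i < b.length) (hj : j + 1 < b.length) (hr : r < b.length) (hc : c < b.length)
    (h : Thru b.length (ghB b i j) r c) : HasMat (hswapA b i j) := by
  rcases h with ⟨s, _, _, hs, e1, e2, e3⟩ | ⟨s, _, _, hs, e1, e2, e3⟩
  · simp only [gh_eq_cv b i j hsq hi hj] at e1 e2 e3
    exact ⟨r, s, Or.inl ⟨by rw [len_hswapA]; omega, by rw [len_hswapA]; omega, e1, e2, e3⟩⟩
  · simp only [gh_eq_cv b i j hsq hi hj] at e1 e2 e3
    exact ⟨s, c, Or.inr ⟨by rw [len_hswapA]; omega, by rw [len_hswapA]; omega, e1, e2, e3⟩⟩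

theorem P2v (b : List (List Int)) (i j r c : Nat) (hsq : SqD b)
    (hi : i + 1 < b.length) (hj : j < b.length) (hr : r < b.length) (hc : c < b.length)
    (h : Thru b.length (gvB b i j) r c) : HasMat (vswapA b i j) := by
  rcases h with ⟨s, _, _, hs, e1, e2, e3⟩ | ⟨s, _, _, hs, e1, e2, e3⟩
  · simp only [gv_eq_cv b i j hsq hi hj] at e1 e2 e3
    exact ⟨r, s, Or.inl ⟨by rw [len_vswapA]; omega, by rw [len_vswapA]; omega, e1, e2, e3⟩⟩
  · simp only [gv_eq_cv b i j hsq hi hj] at e1 e2 e3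
    exact ⟨s, c, Or.inr ⟨by rw [len_vswapA]; omega, by rw [len_vswapA]; omega, e1, e2, e3⟩⟩

-- P3: a triple of the horizontally swapped board is an old triple or a local run
theorem P3 (b : List (List Int)) (i j : Nat) (hsq : SqD b)
    (hi : i < b.length) (hj : j + 1 < b.length)
    (h : HasMat (hswapA b i j)) :
    HasMat b ∨ Thru b.length (ghB b i j) i j ∨ Thru b.length (ghB b i j) i (j+1) := by
  obtain ⟨i0, j0, hm | vm⟩ := h
  · obtain ⟨h1, h2, e1, e2, e3⟩ := hm
    rw [len_hswapA] at h1 h2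
    simp only [← gh_eq_cv b i j hsq hi hj] at e1 e2 e3
    by_cases ht : i0 = i ∧ j ≤ j0 + 2 ∧ j0 ≤ j + 1
    · obtain ⟨rfl, hta, htb⟩ := ht
      by_cases hcj : j0 ≤ j ∧ j ≤ j0 + 2
      · exact Or.inr (Or.inl (Or.inl ⟨j0, hcj.1, hcj.2, h2, e1, e2, e3⟩))
      · refine Or.inr (Or.inr (Or.inl ⟨j0, by omega, by omega, h2, e1, e2, e3⟩))
    · refine Or.inl ⟨i0, j0, Or.inl ⟨h1, h2, ?_, ?_, ?_⟩⟩ <;>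
      · have hg : ∀ c', j0 ≤ c' → c' ≤ j0 + 2 → ghB b i j i0 c' = cv b i0 c' := by
          intro c' hc1 hc2
          unfold ghB
          rw [if_neg (by rintro ⟨rfl, rfl⟩; exact ht ⟨rfl, by omega, by omega⟩),
              if_neg (by rintro ⟨rfl, rfl⟩; exact ht ⟨rfl, by omega, by omega⟩)]
          rfl
        simp only [← hg j0 (by omega) (by omega), ← hg (j0+1) (by omega) (by omega),
          ← hg (j0+2) (by omega) (by omega)]
        first | exact e1 | exact e2 | exact e3
  · obtain ⟨h1, h2, e1, e2, e3⟩ := vm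
    rw [len_hswapA] at h1 h2
    simp only [← gh_eq_cv b i j hsq hi hj] at e1 e2 e3
    by_cases ht : (j0 = j ∨ j0 = j + 1) ∧ i0 ≤ i ∧ i ≤ i0 + 2
    · obtain ⟨hj0, hta, htb⟩ := ht
      rcases hj0 with rfl | rfl
      · exact Or.inr (Or.inl (Or.inr ⟨i0, hta, htb, h1, e1, e2, e3⟩))
      · exact Or.inr (Or.inr (Or.inr ⟨i0, hta, htb, h1, e1, e2, e3⟩))
    · refine Or.inl ⟨i0, j0, Or.inr ⟨h1, h2, ?_, ?_, ?_⟩⟩ <;>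
      · have hg : ∀ r', i0 ≤ r' → r' ≤ i0 + 2 → ghB b i j r' j0 = cv b r' j0 := by
          intro r' hr1 hr2
          unfold ghB
          rw [if_neg (by rintro ⟨rfl, rfl⟩; exact ht ⟨Or.inl rfl, by omega, by omega⟩),
              if_neg (by rintro ⟨rfl, rfl⟩; exact ht ⟨Or.inr rfl, by omega, by omega⟩)]
          rfl
        simp only [← hg i0 (by omega) (by omega), ← hg (i0+1) (by omega) (by omega),
          ← hg (i0+2) (by omega) (by omega)]
        first | exact e1 | exact e2 | exact e3

-- P4: a triple of the vertically swapped board is an old triple or a local run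
theorem P4 (b : List (List Int)) (i j : Nat) (hsq : SqD b)
    (hi : i + 1 < b.length) (hj : j < b.length)
    (h : HasMat (vswapA b i j)) :
    HasMat b ∨ Thru b.length (gvB b i j) i j ∨ Thru b.length (gvB b i j) (i+1) j := by
  obtain ⟨i0, j0, hm | vm⟩ := h
  · obtain ⟨h1, h2, e1, e2, e3⟩ := hm
    rw [len_vswapA] at h1 h2
    simp only [← gv_eq_cv b i j hsq hi hj] at e1 e2 e3
    by_cases ht : (i0 = i ∨ i0 = i + 1) ∧ j0 ≤ j ∧ j ≤ j0 + 2
    · obtain ⟨hi0, hta, htb⟩ := ht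
      rcases hi0 with rfl | rfl
      · exact Or.inr (Or.inl (Or.inl ⟨j0, hta, htb, h2, e1, e2, e3⟩))
      · exact Or.inr (Or.inr (Or.inl ⟨j0, hta, htb, h2, e1, e2, e3⟩))
    · refine Or.inl ⟨i0, j0, Or.inl ⟨h1, h2, ?_, ?_, ?_⟩⟩ <;>
      · have hg : ∀ c', j0 ≤ c' → c' ≤ j0 + 2 → gvB b i j i0 c' = cv b i0 c' := by
          intro c' hc1 hc2
          unfold gvB
          rw [if_neg (by rintro ⟨rfl, rfl⟩; exact ht ⟨Or.inl rfl, by omega, by omega⟩),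
              if_neg (by rintro ⟨h', rfl⟩; exact ht ⟨Or.inr h', by omega, by omega⟩)]
          rfl
        simp only [← hg j0 (by omega) (by omega), ← hg (j0+1) (by omega) (by omega),
          ← hg (j0+2) (by omega) (by omega)]
        first | exact e1 | exact e2 | exact e3
  · obtain ⟨h1, h2, e1, e2, e3⟩ := vm
    rw [len_vswapA] at h1 h2
    simp only [← gv_eq_cv b i j hsq hi hj] at e1 e2 e3
    by_cases ht : j0 = j ∧ i0 ≤ i + 1 ∧ i ≤ i0 + 2
    · obtain ⟨rfl, hta, htb⟩ := ht
      by_cases hci : i0 ≤ i ∧ i ≤ i0 + 2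
      · exact Or.inr (Or.inl (Or.inr ⟨i0, hci.1, hci.2, h1, e1, e2, e3⟩))
      · exact Or.inr (Or.inr (Or.inr ⟨i0, by omega, by omega, h1, e1, e2, e3⟩))
    · refine Or.inl ⟨i0, j0, Or.inr ⟨h1, h2, ?_, ?_, ?_⟩⟩ <;>
      · have hg : ∀ r', i0 ≤ r' → r' ≤ i0 + 2 → gvB b i j r' j0 = cv b r' j0 := by
          intro r' hr1 hr2
          unfold gvB
          rw [if_neg (by rintro ⟨rfl, rfl⟩; exact ht ⟨rfl, by omega, by omega⟩),
              if_neg (by rintro ⟨rfl, rfl⟩; exact ht ⟨rfl, by omega, by omega⟩)]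
          rfl
        simp only [← hg i0 (by omega) (by omega), ← hg (i0+1) (by omega) (by omega),
          ← hg (i0+2) (by omega) (by omega)]
        first | exact e1 | exact e2 | exact e3

-- the main equivalence on square boards
theorem main_eq (b : List (List Int)) (hsq : SqD b) : try_swap b = try_swap_alt b := by
  rw [Bool.eq_iff_iff, A_iff b hsq, B_iff b hsq]
  constructor
  · rintro ⟨i, j, hi, hj, hm | ⟨hi1, hm⟩⟩
    · rcases P3 b i j hsq hi hj hm with h | h | h
      · exact Or.inl h
      · exact Or.inr ⟨i, j, hi, hj, Or.inl (Or.inl h)⟩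
      · exact Or.inr ⟨i, j, hi, hj, Or.inl (Or.inr h)⟩
    · rcases P4 b i j hsq (by omega) (by omega) hm with h | h | h
      · exact Or.inl h
      · exact Or.inr ⟨i, j, hi, hj, Or.inr ⟨hi1, Or.inl h⟩⟩
      · exact Or.inr ⟨i, j, hi, hj, Or.inr ⟨hi1, Or.inr h⟩⟩
  · rintro (h | ⟨i, j, hi, hj, (h | h) | ⟨hi1, h | h⟩⟩)
    · exact P1 b hsq h
    · exact ⟨i, j, hi, hj, Or.inl (P2h b i j i j hsq hi hj hi (by omega) h)⟩
    · exact ⟨i, j, hi, hj, Or.inl (P2h b i j i (j+1) hsq hi hj hi hj h)⟩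
    · exact ⟨i, j, hi, hj, Or.inr ⟨hi1, P2v b i j i j hsq (by omega) (by omega) hi (by omega) h⟩⟩
    · exact ⟨i, j, hi, hj, Or.inr ⟨hi1, P2v b i j (i+1) j hsq (by omega) (by omega) hi1 (by omega) h⟩⟩

-- boards of height ≤ 1: no swap exists, both sides are False
theorem small_case (b : List (List Int)) (hb : b.length ≤ 1) :
    try_swap b = try_swap_alt b := by
  match b, hb with
  | [], _ => rfl
  | [r], _ => rfl

-- ===== VERDICT =====
theorem try_swap_spec : Claim_equal_try_swap := by
  intro board _ hpre
  unfold Spec_try_swap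
  by_cases hb : board.length ≤ 1
  · exact small_case board hb
  · rcases hpre with h | hsq
    · omega
    · exact main_eq board (fun k hk => by
        rw [List.getD_eq_getElem board [] hk]
        exact hsq _ (List.getElem_mem hk))
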